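-- pv_equiv track=rewrite | github.com/projectPythonator/advent_of_code | year_2023/2023_13a.py | get_info_on_mirror
-- ===== SOURCE A (Python) =====
-- def get_info_on_mirror(arr):
--     last = -1
--     amount = 0
--     for i in range(1, len(arr)):
--         if arr[i]==arr[i-1]:
--             a=i
--             b=i-1
--             while b>=0 and a<len(arr) and arr[a]==arr[b]:
--                 b-=1
--                 a+=1
--             if b<0 or a>=len(arr):
--                 amount += 1
--                 last = i
--     return last, amount
-- ===== SOURCE B (Python) =====
-- def get_info_on_mirror(arr):
--     # Manacher's algorithm for even palindromic centers: d[i] = number of matching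
--     # pairs around the gap between rows i-1 and i; a mirror line at i reaches an
--     # edge iff d[i] == min(i, n - i).
--     n = len(arr)
--     d = [0] * n
--     l, r = 0, -1
--     for i in range(n):
--         k = 0
--         if i <= r:
--             k = min(d[l + r + 1 - i], r - i + 1)
--         while 0 <= i - k - 1 and i + k < n and arr[i - k - 1] == arr[i + k]:
--             k += 1
--         d[i] = k
--         if i + k - 1 > r:
--             l = i - k
--             r = i + k - 1
--     last = -1
--     amount = 0
--     for i in range(1, n):
--         if d[i] >= min(i, n - i):
--             last = i
--             amount += 1
--     return last, amount
-- ===== Notes on version B (the rewrite author's own statement) =====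
-- stated objective: faster
-- what changed: Replaces A's independent two-pointer re-expansion at every adjacent-equal split with Manacher's algorithm for even palindromic centers: radii already computed are reused via the mirror index of the rightmost palindromic window, so each row comparison advances the window and total comparisons are linear in the number of rows.
import Mathlib
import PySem

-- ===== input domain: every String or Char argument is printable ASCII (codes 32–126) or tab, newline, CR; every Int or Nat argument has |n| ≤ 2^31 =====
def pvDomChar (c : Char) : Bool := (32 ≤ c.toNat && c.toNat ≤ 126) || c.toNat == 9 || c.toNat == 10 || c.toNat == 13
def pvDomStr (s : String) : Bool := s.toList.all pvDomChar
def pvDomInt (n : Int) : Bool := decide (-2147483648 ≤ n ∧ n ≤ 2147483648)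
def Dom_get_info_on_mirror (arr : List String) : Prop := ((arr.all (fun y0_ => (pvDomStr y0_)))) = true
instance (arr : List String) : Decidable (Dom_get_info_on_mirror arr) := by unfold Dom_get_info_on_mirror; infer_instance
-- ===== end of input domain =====

-- B replaces A's per-split two-pointer re-expansion with Manacher's algorithm for even
-- palindromic centers (radii reused via the mirror of the rightmost window); objective: alternative.

-- ===== PORT A =====
-- the inner 'while b>=0 and a<len(arr) and arr[a]==arr[b]: b-=1; a+=1' loop of A
def pvExpandA (arr : List String) (a b : Int) : Int × Int :=
  if h : 0 ≤ b ∧ a < (arr.length : Int) ∧ PySem.List.pyGetD arr a "" = PySem.List.pyGetD arr b "" then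
    pvExpandA arr (a + 1) (b - 1)
  else (a, b)
termination_by ((arr.length : Int) - a).toNat
decreasing_by omega

def get_info_on_mirror (arr : List String) : Int × Int :=
  (PySem.List.pyRange 1 (arr.length : Int) 1).foldl
    (fun st i =>
      if PySem.List.pyGetD arr i "" = PySem.List.pyGetD arr (i - 1) "" then
        let ab := pvExpandA arr i (i - 1)
        if ab.2 < 0 ∨ (arr.length : Int) ≤ ab.1 then (i, st.2 + 1) else st
      else st)
    (-1, 0)

-- ===== PORT B =====
-- B's inner 'while 0 <= i - k - 1 and i + k < n and arr[i - k - 1] == arr[i + k]: k += 1'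
def pvExtendB (arr : List String) (i k : Int) : Int :=
  if h : 0 ≤ i - k - 1 ∧ i + k < (arr.length : Int) ∧
      PySem.List.pyGetD arr (i - k - 1) "" = PySem.List.pyGetD arr (i + k) "" then
    pvExtendB arr i (k + 1)
  else k
termination_by ((arr.length : Int) - (i + k)).toNat
decreasing_by omega

def get_info_on_mirror_alt (arr : List String) : Int × Int :=
  let n : Int := (arr.length : Int)
  let st :=
    (PySem.List.pyRange 0 n 1).foldl
      (fun (st : List Int × Int × Int) i =>
        let d := st.1
        let l := st.2.1
        let r := st.2.2
        let k0 : Int := if i ≤ r then min (PySem.List.pyGetD d (l + r + 1 - i) 0) (r - i + 1) else 0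
        let k := pvExtendB arr i k0
        let d' := PySem.List.pySetD d i k
        if r < i + k - 1 then (d', i - k, i + k - 1) else (d', l, r))
      (List.replicate arr.length (0 : Int), (0 : Int), (-1 : Int))
  let d := st.1
  (PySem.List.pyRange 1 n 1).foldl
    (fun st i => if min i (n - i) ≤ PySem.List.pyGetD d i 0 then (i, st.2 + 1) else st)
    (-1, 0)

-- ===== PRECONDITION & SPEC =====
def Spec_get_info_on_mirror (arr : List String) (out : Int × Int) : Prop := out = get_info_on_mirror_alt arr
instance (arr : List String) (out : Int × Int) : Decidable (Spec_get_info_on_mirror arr out) := by unfold Spec_get_info_on_mirror; infer_instance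

-- ===== CLAIM (what is proved, stated in full; the proofs are below) =====
def Claim_equal_get_info_on_mirror : Prop := ∀ (arr : List String), Dom_get_info_on_mirror arr → Spec_get_info_on_mirror arr (get_info_on_mirror arr)

-- ===== LEMMAS AND PROOFS =====

-- the guard of B's while loop: the pair at offset j around the gap before row i matches, in bounds
def pvGoodP (arr : List String) (i j : Int) : Prop :=
  0 ≤ i - j - 1 ∧ i + j < (arr.length : Int) ∧
    PySem.List.pyGetD arr (i - j - 1) "" = PySem.List.pyGetD arr (i + j) ""

theorem pvExtendB_le (arr : List String) (i k : Int) : k ≤ pvExtendB arr i k := by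
  rw [pvExtendB]
  split_ifs with h
  · have := pvExtendB_le arr i (k + 1); omega
  · omega
termination_by ((arr.length : Int) - (i + k)).toNat
decreasing_by omega

theorem pvExtendB_stop (arr : List String) (i k : Int) : ¬ pvGoodP arr i (pvExtendB arr i k) := by
  rw [pvExtendB]
  split_ifs with h
  · exact pvExtendB_stop arr i (k + 1)
  · exact h
termination_by ((arr.length : Int) - (i + k)).toNat
decreasing_by omega

theorem pvExtendB_good (arr : List String) (i k : Int) :
    ∀ j, k ≤ j → j < pvExtendB arr i k → pvGoodP arr i j := by
  rw [pvExtendB]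
  split_ifs with h
  · intro j hj hj'
    rcases eq_or_lt_of_le hj with rfl | hlt
    · exact h
    · exact pvExtendB_good arr i (k + 1) j (by omega) hj'
  · intro j hj hj'; omega
termination_by ((arr.length : Int) - (i + k)).toNat
decreasing_by omega

theorem pvExtendB_eq (arr : List String) (i : Int) (K : Int) (k : Int)
    (hk : k ≤ K) (hg : ∀ j, k ≤ j → j < K → pvGoodP arr i j) (hs : ¬ pvGoodP arr i K) :
    pvExtendB arr i k = K := by
  rw [pvExtendB]
  rcases eq_or_lt_of_le hk with rfl | hlt
  · split_ifs with h
    · exact absurd h hs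
    · rfl
  · have hgk : pvGoodP arr i k := hg k le_rfl hlt
    split_ifs with h
    · exact pvExtendB_eq arr i K (k + 1) (by omega) (fun j hj hj' => hg j (by omega) hj') hs
    · exact absurd hgk h
termination_by (K - k).toNat
decreasing_by omega

-- the radius B stores for center i equals its from-scratch expansion
theorem pvRad_nonneg (arr : List String) (i : Int) : 0 ≤ pvExtendB arr i 0 :=
  pvExtendB_le arr i 0

theorem pvRad_le (arr : List String) (i : Int) (h0 : 0 ≤ i) (hn : i ≤ (arr.length : Int)) :
    pvExtendB arr i 0 ≤ i ∧ pvExtendB arr i 0 ≤ (arr.length : Int) - i := by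
  set K := pvExtendB arr i 0 with hK
  have hK0 : 0 ≤ K := pvRad_nonneg arr i
  rcases eq_or_lt_of_le hK0 with h | h
  · omega
  · have := pvExtendB_good arr i 0 (K - 1) (by omega) (by omega)
    rcases this with ⟨h1, h2, -⟩
    omega

-- inside the palindromic window of center c, rows reflect across the gap
theorem pvReflect (arr : List String) (c : Int) (p : Int)
    (h1 : c - pvExtendB arr c 0 ≤ p) (h2 : p ≤ c + pvExtendB arr c 0 - 1) :
    PySem.List.pyGetD arr p "" = PySem.List.pyGetD arr (2 * c - 1 - p) "" := by
  by_cases hp : c ≤ p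
  · have hg := pvExtendB_good arr c 0 (p - c) (by omega) (by omega)
    rcases hg with ⟨-, -, hg⟩
    have e1 : c - (p - c) - 1 = 2 * c - 1 - p := by omega
    have e2 : c + (p - c) = p := by omega
    rw [e1, e2] at hg
    exact hg.symm
  · have hg := pvExtendB_good arr c 0 (c - 1 - p) (by omega) (by omega)
    rcases hg with ⟨-, -, hg⟩
    have e1 : c - (c - 1 - p) - 1 = p := by omega
    have e2 : c + (c - 1 - p) = 2 * c - 1 - p := by omega
    rw [e1, e2] at hg
    exact hg

-- Manacher's mirror bound: inside the window of center c, the mirrored radius is a lower bound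
theorem pvMirror (arr : List String) (c i : Int)
    (hc0 : 0 ≤ c - pvExtendB arr c 0) (hci : c < i) (hir : i ≤ c + pvExtendB arr c 0 - 1) :
    min (pvExtendB arr (2 * c - i) 0) (c + pvExtendB arr c 0 - i) ≤ pvExtendB arr i 0 := by
  set rc := pvExtendB arr c 0 with hrc
  set i' := 2 * c - i with hi'
  set k0 := min (pvExtendB arr i' 0) (c + rc - i) with hk0
  have hk0nn : 0 ≤ k0 := le_min (pvRad_nonneg arr i') (by omega)
  have hrcn : rc ≤ (arr.length : Int) - c := by
    rcases eq_or_lt_of_le (pvRad_nonneg arr c) with h | h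
    · -- rc = 0: then hir gives i ≤ c - 1 < i, contradiction
      omega
    · have := pvExtendB_good arr c 0 (rc - 1) (by omega) (by omega)
      rcases this with ⟨-, h2, -⟩; omega
  have hgood : ∀ j, 0 ≤ j → j < k0 → pvGoodP arr i j := by
    intro j hj hjk
    have hb1 : 0 ≤ i - j - 1 := by omega
    have hb2 : i + j < (arr.length : Int) := by omega
    refine ⟨hb1, hb2, ?_⟩
    have hg' := pvExtendB_good arr i' 0 j hj (by omega)
    rcases hg' with ⟨-, -, hg'⟩
    have hr1 := pvReflect arr c (i - j - 1) (by omega) (by omega)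
    have hr2 := pvReflect arr c (i' - j - 1) (by omega) (by omega)
    have e1 : 2 * c - 1 - (i - j - 1) = i' + j := by omega
    have e2 : 2 * c - 1 - (i' - j - 1) = i + j := by omega
    rw [e1] at hr1
    rw [e2] at hr2
    calc PySem.List.pyGetD arr (i - j - 1) "" = PySem.List.pyGetD arr (i' + j) "" := hr1
      _ = PySem.List.pyGetD arr (i' - j - 1) "" := hg'.symm
      _ = PySem.List.pyGetD arr (i + j) "" := hr2
  by_contra hcon
  push Not at hcon
  exact pvExtendB_stop arr i 0 (hgood _ (pvRad_nonneg arr i) (by omega))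

-- A's two-pointer expansion in terms of B's while loop
theorem pvExpandA_eq_extend (arr : List String) (i k : Int) :
    pvExpandA arr (i + k) (i - 1 - k) = (i + pvExtendB arr i k, i - 1 - pvExtendB arr i k) := by
  rw [pvExpandA, pvExtendB]
  have hiff : (0 ≤ i - 1 - k ∧ i + k < (arr.length : Int) ∧
      PySem.List.pyGetD arr (i + k) "" = PySem.List.pyGetD arr (i - 1 - k) "") ↔
      (0 ≤ i - k - 1 ∧ i + k < (arr.length : Int) ∧
      PySem.List.pyGetD arr (i - k - 1) "" = PySem.List.pyGetD arr (i + k) "") := by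
    have e : i - 1 - k = i - k - 1 := by omega
    rw [e]
    constructor
    · rintro ⟨a, b, c⟩; exact ⟨a, b, c.symm⟩
    · rintro ⟨a, b, c⟩; exact ⟨a, b, c.symm⟩
  split_ifs with h1 h2 h3
  · have e1 : i + k + 1 = i + (k + 1) := by omega
    have e2 : i - 1 - k - 1 = i - 1 - (k + 1) := by omega
    rw [e1, e2]
    exact pvExpandA_eq_extend arr i (k + 1)
  · exact absurd (hiff.mp h1) h2
  · exact absurd (hiff.mpr h3) h1
  · rfl
termination_by ((arr.length : Int) - (i + k)).toNat
decreasing_by omega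

-- A counts split i  ⟺  the center-i radius reaches an edge
theorem pvCondA_iff (arr : List String) (i : Int) (h1 : 1 ≤ i) (h2 : i < (arr.length : Int)) :
    ((PySem.List.pyGetD arr i "" = PySem.List.pyGetD arr (i - 1) "") ∧
      ((pvExpandA arr i (i - 1)).2 < 0 ∨ (arr.length : Int) ≤ (pvExpandA arr i (i - 1)).1)) ↔
      min i ((arr.length : Int) - i) ≤ pvExtendB arr i 0 := by
  have hAB := pvExpandA_eq_extend arr i 0
  have e1 : i + 0 = i := by omega
  have e2 : i - 1 - 0 = i - 1 := by omega
  rw [e1, e2] at hAB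
  set K := pvExtendB arr i 0 with hK
  rw [hAB]
  constructor
  · rintro ⟨-, h⟩
    simp only at h
    omega
  · intro h
    have hKpos : 0 < K := by omega
    have hg := pvExtendB_good arr i 0 0 le_rfl hKpos
    rcases hg with ⟨-, -, hg⟩
    have e3 : i - 0 - 1 = i - 1 := by omega
    have e4 : i + 0 = i := by omega
    rw [e3, e4] at hg
    refine ⟨hg.symm, ?_⟩
    simp only
    omega

-- the Manacher-fold invariant
def pvInv (arr : List String) (m : Nat) (st : List Int × Int × Int) : Prop :=
  st.1.length = arr.length ∧
  (∀ j : Nat, j < m → PySem.List.pyGetD st.1 (j : Int) 0 = pvExtendB arr (j : Int) 0) ∧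
  ((st.2.1 = 0 ∧ st.2.2 = -1) ∨
    ∃ c : Nat, c < m ∧ st.2.1 = (c : Int) - pvExtendB arr (c : Int) 0 ∧
      st.2.2 = (c : Int) + pvExtendB arr (c : Int) 0 - 1)

theorem pv_body_inv (arr : List String) (m : Nat) (hm : m < arr.length)
    (st : List Int × Int × Int) (h : pvInv arr m st) :
    pvInv arr (m + 1)
      ((fun (st : List Int × Int × Int) (i : Int) =>
        let d := st.1
        let l := st.2.1
        let r := st.2.2
        let k0 : Int := if i ≤ r then min (PySem.List.pyGetD d (l + r + 1 - i) 0) (r - i + 1) else 0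
        let k := pvExtendB arr i k0
        let d' := PySem.List.pySetD d i k
        if r < i + k - 1 then (d', i - k, i + k - 1) else (d', l, r)) st (m : Int)) := by
  obtain ⟨hlen, hd, hw⟩ := h
  obtain ⟨d, l, r⟩ := st
  simp only at hlen hd hw ⊢
  set k0 : Int := if (m : Int) ≤ r then min (PySem.List.pyGetD d (l + r + 1 - m) 0) (r - m + 1) else 0 with hk0
  -- the computed radius is the true one
  have hkrad : pvExtendB arr (m : Int) k0 = pvExtendB arr (m : Int) 0 := by
    by_cases hmr : (m : Int) ≤ r
    · rcases hw with ⟨hl, hr⟩ | ⟨c, hc, hl, hr⟩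
      · omega
      · have hradc := pvRad_le arr (c : Int) (by omega) (by omega)
        have hcm : (c : Int) < (m : Int) := by omega
        have hi'0 : 0 ≤ 2 * (c : Int) - m := by omega
        have hi'm : 2 * (c : Int) - m < (m : Int) := by omega
        have hdidx : PySem.List.pyGetD d (l + r + 1 - m) 0 = pvExtendB arr (2 * (c : Int) - m) 0 := by
          have e : l + r + 1 - (m : Int) = ((2 * (c : Int) - m).toNat : Int) := by omega
          rw [e, hd (2 * (c : Int) - (m : Int)).toNat (by omega)]
          congr 1
          omega
        have hmir := pvMirror arr (c : Int) (m : Int) (by omega) hcm (by omega)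
        have hk0rad : k0 ≤ pvExtendB arr (m : Int) 0 := by
          rw [hk0, if_pos hmr, hdidx]
          have e : r - (m : Int) + 1 = (c : Int) + pvExtendB arr (c : Int) 0 - m := by omega
          rw [e]
          exact hmir
        have hk0nn : 0 ≤ k0 := by
          rw [hk0, if_pos hmr, hdidx]
          exact le_min (pvRad_nonneg arr _) (by omega)
        exact pvExtendB_eq arr (m : Int) (pvExtendB arr (m : Int) 0) k0 hk0rad
          (fun j hj hj' => pvExtendB_good arr (m : Int) 0 j (by omega) hj')
          (pvExtendB_stop arr (m : Int) 0)
    · rw [hk0, if_neg hmr]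
  set k := pvExtendB arr (m : Int) k0 with hkdef
  have hlend' : (PySem.List.pySetD d (m : Int) k).length = arr.length := by
    rw [PySem.List.pySetD_natCast]
    simp [hlen]
  have hd' : ∀ j : Nat, j < m + 1 →
      PySem.List.pyGetD (PySem.List.pySetD d (m : Int) k) (j : Int) 0 = pvExtendB arr (j : Int) 0 := by
    intro j hj
    rw [PySem.List.pyGetD_pySetD_natCast d m j k 0 (by omega)]
    by_cases hjm : j = m
    · rw [if_pos hjm, hkrad, hjm]
    · rw [if_neg hjm]
      exact hd j (by omega)
  split_ifs with hupd
  · exact ⟨hlend', hd', Or.inr ⟨m, by omega, by rw [hkrad], by rw [hkrad]⟩⟩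
  · refine ⟨hlend', hd', ?_⟩
    rcases hw with ⟨hl, hr⟩ | ⟨c, hc, hl, hr⟩
    · exact Or.inl ⟨hl, hr⟩
    · exact Or.inr ⟨c, by omega, hl, hr⟩

theorem pv_fold_inv (arr : List String) (m : Nat) (hm : m ≤ arr.length) :
    pvInv arr m
      ((PySem.List.pyRange 0 (m : Int) 1).foldl
        (fun (st : List Int × Int × Int) i =>
          let d := st.1
          let l := st.2.1
          let r := st.2.2
          let k0 : Int := if i ≤ r then min (PySem.List.pyGetD d (l + r + 1 - i) 0) (r - i + 1) else 0
          let k := pvExtendB arr i k0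
          let d' := PySem.List.pySetD d i k
          if r < i + k - 1 then (d', i - k, i + k - 1) else (d', l, r))
        (List.replicate arr.length (0 : Int), (0 : Int), (-1 : Int))) := by
  induction m with
  | zero =>
    rw [PySem.List.pyRange_one_eq_nil (by omega)]
    refine ⟨by simp, by omega, Or.inl ⟨rfl, rfl⟩⟩
  | succ m ih =>
    have e : ((m + 1 : Nat) : Int) = (m : Int) + 1 := by omega
    rw [e, PySem.List.pyRange_one_succ_right (by omega), List.foldl_append]
    simp only [List.foldl_cons, List.foldl_nil]
    exact pv_body_inv arr m (by omega) _ (ih (by omega))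

theorem pv_second (arr : List String) (d : List Int)
    (hd : ∀ j : Nat, j < arr.length → PySem.List.pyGetD d (j : Int) 0 = pvExtendB arr (j : Int) 0) :
    (PySem.List.pyRange 1 (arr.length : Int) 1).foldl
      (fun st i =>
        if PySem.List.pyGetD arr i "" = PySem.List.pyGetD arr (i - 1) "" then
          let ab := pvExpandA arr i (i - 1)
          if ab.2 < 0 ∨ (arr.length : Int) ≤ ab.1 then (i, st.2 + 1) else st
        else st)
      ((-1 : Int), (0 : Int)) =
    (PySem.List.pyRange 1 (arr.length : Int) 1).foldl
      (fun st i =>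
        if min i ((arr.length : Int) - i) ≤ PySem.List.pyGetD d i 0 then (i, st.2 + 1) else st)
      ((-1 : Int), (0 : Int)) := by
  apply PySem.List.foldl_congr_mem
  intro acc i hi
  rw [PySem.List.mem_pyRange_one] at hi
  have hdi : PySem.List.pyGetD d i 0 = pvExtendB arr i 0 := by
    have e : i = ((i.toNat : Nat) : Int) := by omega
    rw [e, hd i.toNat (by omega)]
  have hiff := pvCondA_iff arr i hi.1 hi.2
  have hcd : (min i ((arr.length : Int) - i) ≤ PySem.List.pyGetD d i 0) ↔
      min i ((arr.length : Int) - i) ≤ pvExtendB arr i 0 := by rw [hdi]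
  by_cases hc : min i ((arr.length : Int) - i) ≤ pvExtendB arr i 0
  · obtain ⟨hg, hoff⟩ := hiff.mpr hc
    rw [if_pos hg]
    simp only
    rw [if_pos hoff, if_pos (hcd.mpr hc)]
  · rw [if_neg (fun h => hc (hcd.mp h))]
    by_cases hg : PySem.List.pyGetD arr i "" = PySem.List.pyGetD arr (i - 1) ""
    · rw [if_pos hg]
      simp only
      rw [if_neg (fun hoff => hc (hiff.mp ⟨hg, hoff⟩))]
    · rw [if_neg hg]

theorem get_info_on_mirror_eq_alt (arr : List String) :
    get_info_on_mirror arr = get_info_on_mirror_alt arr := by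
  unfold get_info_on_mirror get_info_on_mirror_alt
  simp only
  refine pv_second arr _ ?_
  intro j hj
  exact (pv_fold_inv arr arr.length le_rfl).2.1 j hj

-- ===== VERDICT (by name: the statement is the Claim_ definition above) =====
theorem get_info_on_mirror_spec : Claim_equal_get_info_on_mirror := by
  intro arr _
  unfold Spec_get_info_on_mirror
  exact get_info_on_mirror_eq_alt arr
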